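-- pv_equiv track=rewrite | github.com/PAMPAS-Lab/Pywen | pywen/cli/commands/custom_prompts.py | expand_numeric_placeholders
-- ===== SOURCE A (Python) =====
-- from typing import Dict, Iterable, List, Optional, Sequence, Tuple, Any, Optional
--
-- def expand_numeric_placeholders(content: str, args: Sequence[str]) -> str:
--     out: List[str] = []
--     i = 0
--     cached_joined_args: Optional[str] = None
--     while True:
--         offset = content.find("$", i)
--         if offset == -1:
--             out.append(content[i:])
--             break
--         out.append(content[i:offset])
--         rest = content[offset:]
--         if len(rest) >= 2:
--             second = rest[1]
--             if second == "$":
--                 out.append("$$")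
--                 i = offset + 2
--                 continue
--             if "1" <= second <= "9":
--                 idx = ord(second) - ord("1")
--                 if idx < len(args):
--                     out.append(args[idx])
--                 i = offset + 2
--                 continue
--         if len(rest) > len("ARGUMENTS") and rest[1:].startswith("ARGUMENTS"):
--             if args:
--                 if cached_joined_args is None:
--                     cached_joined_args = " ".join(args)
--                 out.append(cached_joined_args)
--             i = offset + 1 + len("ARGUMENTS")
--             continue
--         out.append("$")
--         i = offset + 1
--     return "".join(out)
-- ===== SOURCE B (Python) =====
-- def expand_numeric_placeholders(content, args):
--     parts = content.split('$')
--     out = [parts[0]]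
--     joined = ' '.join(args)
--     n = len(parts)
--     k = 1
--     while k < n:
--         p = parts[k]
--         if p == '':
--             if k + 1 < n:
--                 out.append('$$')
--                 out.append(parts[k + 1])
--                 k += 2
--             else:
--                 out.append('$')  # lone '$' at end of content
--                 k += 1
--             continue
--         c = p[0]
--         if '1' <= c <= '9':
--             idx = ord(c) - ord('1')
--             if idx < len(args):
--                 out.append(args[idx])
--             out.append(p[1:])
--         elif p.startswith('ARGUMENTS'):
--             out.append(joined)
--             out.append(p[len('ARGUMENTS'):])
--         else:
--             out.append('$')
--             out.append(p)
--         k += 1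
--     return ''.join(out)
-- ===== Notes on version B (the rewrite author's own statement) =====
-- stated objective: alternative
-- what changed: B replaces A's repeated content.find('$')/slice scanning loop (with list-of-strings accumulator and lazy join cache) by a single content.split('$') followed by one pass that dispatches on each segment's leading characters.
import Mathlib
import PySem

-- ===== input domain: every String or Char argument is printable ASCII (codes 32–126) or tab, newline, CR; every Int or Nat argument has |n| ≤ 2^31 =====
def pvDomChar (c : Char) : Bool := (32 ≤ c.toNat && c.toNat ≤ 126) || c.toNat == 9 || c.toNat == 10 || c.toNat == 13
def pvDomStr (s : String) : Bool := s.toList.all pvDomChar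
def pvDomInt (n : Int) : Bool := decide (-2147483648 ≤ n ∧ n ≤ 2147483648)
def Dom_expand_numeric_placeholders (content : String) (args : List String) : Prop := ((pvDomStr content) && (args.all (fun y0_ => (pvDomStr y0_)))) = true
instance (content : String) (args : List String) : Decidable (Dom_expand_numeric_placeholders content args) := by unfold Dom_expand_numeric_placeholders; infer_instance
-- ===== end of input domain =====

-- B replaces A's find('$')/slice scanning loop by one split('$') pass followed by a
-- dispatch on each segment's first characters (objective: alternative decomposition).

-- ===== PORT A =====
-- the while-loop of A: `cs` is the still-unprocessed suffix content[i:];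
-- `rest = cs.drop offset` is destructured by the match (second = rest[1]).
-- `fuel` only makes the recursion structural: every iteration consumes at least one
-- character, so with fuel = initial length the 0-case is reached only with cs = [].
def pvGoA (args : List String) (joined : List Char) : Nat → List Char → List Char
  | 0, cs => cs
  | fuel + 1, cs =>
    if PySem.Chars.find cs ['$'] = -1 then cs
    else
      cs.take (PySem.Chars.find cs ['$']).toNat ++
        (match cs.drop (PySem.Chars.find cs ['$']).toNat with
         | _ :: second :: t2 =>
           if second = '$' then
             '$' :: '$' :: pvGoA args joined fuel t2
           else if '1' ≤ second ∧ second ≤ '9' then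
             (if h : second.toNat - '1'.toNat < args.length then
                (args[second.toNat - '1'.toNat]).toList
              else []) ++ pvGoA args joined fuel t2
           else
             -- Python's fall-through after the `len(rest) >= 2` block
             if 9 < t2.length + 2 ∧
                 PySem.Chars.startswith (second :: t2) "ARGUMENTS".toList then
               (if args.isEmpty then [] else joined) ++ pvGoA args joined fuel ((second :: t2).drop 9)
             else '$' :: pvGoA args joined fuel (second :: t2)
         | rest =>
           if 9 < rest.length ∧
               PySem.Chars.startswith (rest.drop 1) "ARGUMENTS".toList then
             (if args.isEmpty then [] else joined) ++ pvGoA args joined fuel (rest.drop 10)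
           else '$' :: pvGoA args joined fuel (rest.drop 1))

def expand_numeric_placeholders (content : String) (args : List String) : String :=
  String.mk (pvGoA args (PySem.Str.join " " args).toList content.toList.length content.toList)

-- ===== PORT B =====
-- B's while-loop over parts[1:]; each element is the text after one '$' separator
def pvProcB (args : List String) (joined : List Char) : List (List Char) → List Char
  | [] => []
  | p :: ps =>
    match p, ps with
    | [], [] => ['$']                                -- lone '$' at end of content
    | [], q :: qs => '$' :: '$' :: (q ++ pvProcB args joined qs)
    | c :: t, ps =>
      if '1' ≤ c ∧ c ≤ '9' then
        (if h : c.toNat - '1'.toNat < args.length then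
           (args[c.toNat - '1'.toNat]).toList
         else []) ++ (t ++ pvProcB args joined ps)
      else if PySem.Chars.startswith p "ARGUMENTS".toList then
        joined ++ (p.drop 9 ++ pvProcB args joined ps)
      else '$' :: (p ++ pvProcB args joined ps)

def expand_numeric_placeholders_alt (content : String) (args : List String) : String :=
  match PySem.Chars.splitOn content.toList ['$'] with
  | [] => ""                                         -- split never returns []; unreachable
  | p :: ps => String.mk (p ++ pvProcB args (PySem.Str.join " " args).toList ps)

-- ===== PRECONDITION & SPEC =====
def Spec_expand_numeric_placeholders (content : String) (args : List String) (out : String) : Prop := out = expand_numeric_placeholders_alt content args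
instance (content : String) (args : List String) (out : String) : Decidable (Spec_expand_numeric_placeholders content args out) := by unfold Spec_expand_numeric_placeholders; infer_instance

-- ===== CLAIM (what is proved, stated in full; the proofs are below) =====
def Claim_equal_expand_numeric_placeholders : Prop := ∀ (content : String) (args : List String), Dom_expand_numeric_placeholders content args → Spec_expand_numeric_placeholders content args (expand_numeric_placeholders content args)

-- ===== LEMMAS AND PROOFS =====

-- a pure structural model of str.split('$')
def pvSplit : List Char → List (List Char)
  | [] => [[]]
  | c :: rest => if c = '$' then [] :: pvSplit rest
                 else (c :: (pvSplit rest).headI) :: (pvSplit rest).tail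

lemma pvSplit_ne_nil (l : List Char) : pvSplit l ≠ [] := by
  cases l with
  | nil => simp [pvSplit]
  | cons c rest => by_cases h : c = '$' <;> simp [pvSplit, h]

lemma pvSplit_cons (l : List Char) : (pvSplit l).headI :: (pvSplit l).tail = pvSplit l := by
  have hne := pvSplit_ne_nil l
  cases h : pvSplit l with
  | nil => exact absurd h hne
  | cons p ps => simp

lemma pv_go_eq (l : List Char) : ∀ (fuel : Nat) (cur : List Char) (acc : List (List Char)),
    l.length ≤ fuel →
    PySem.Chars.splitOn.go ['$'] fuel l cur acc
      = acc.reverse ++ ((cur.reverse ++ (pvSplit l).headI) :: (pvSplit l).tail) := by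
  induction l with
  | nil =>
    intro fuel cur acc _
    cases fuel <;> simp [PySem.Chars.splitOn.go, pvSplit]
  | cons c rest ih =>
    intro fuel cur acc hf
    cases fuel with
    | zero => simp at hf
    | succ f =>
      by_cases h : c = '$'
      · subst h
        rw [PySem.Chars.splitOn.go]
        rw [if_pos (by simp [List.isPrefixOf])]
        simp only [List.length_cons] at hf
        simp only [List.length_cons, List.length_nil, List.drop_succ_cons, List.drop_zero]
        rw [ih f [] ((cur.reverse) :: acc) (by omega)]
        simp [pvSplit, pvSplit_cons]
      · rw [PySem.Chars.splitOn.go]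
        rw [if_neg (by simp [List.isPrefixOf]; exact fun hh => absurd hh.symm h)]
        simp only [List.length_cons] at hf
        rw [ih f (c :: cur) acc (by omega)]
        simp [pvSplit, h]

lemma pv_splitOn_eq (l : List Char) : PySem.Chars.splitOn l ['$'] = pvSplit l := by
  unfold PySem.Chars.splitOn
  rw [pv_go_eq l (l.length + 1) [] [] (by omega)]
  simp [pvSplit_cons]

lemma pvSplit_no_dollar (l : List Char) (h : '$' ∉ l) : pvSplit l = [l] := by
  induction l with
  | nil => rfl
  | cons c rest ih =>
    simp only [List.mem_cons, not_or] at h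
    rw [pvSplit, if_neg (fun hc => h.1 hc.symm), ih h.2]
    rfl

lemma pvSplit_append (pre suf : List Char) (h : '$' ∉ pre) :
    pvSplit (pre ++ '$' :: suf) = pre :: pvSplit suf := by
  induction pre with
  | nil => simp [pvSplit]
  | cons c pre ih =>
    simp only [List.mem_cons, not_or] at h
    simp only [List.cons_append, pvSplit, if_neg (fun hc : c = '$' => h.1 hc.symm), ih h.2]
    rfl

lemma pvSplit_headI_no_dollar (l : List Char) : '$' ∉ (pvSplit l).headI := by
  induction l with
  | nil => simp [pvSplit]
  | cons c rest ih =>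
    by_cases h : c = '$'
    · simp [pvSplit, h]
    · simp [pvSplit, h, ih]
      exact fun hc => h hc.symm

lemma pvSplit_decomp (l : List Char) (p : List Char) (ps : List (List Char))
    (h : pvSplit l = p :: ps) :
    (l = p ∧ ps = []) ∨ ∃ t, l = p ++ '$' :: t ∧ pvSplit t = ps := by
  induction l generalizing p ps with
  | nil =>
    simp only [pvSplit, List.cons.injEq] at h
    exact Or.inl ⟨h.1, h.2.symm⟩
    
  | cons c rest ih =>
    by_cases hc : c = '$'
    · subst hc
      rw [pvSplit, if_pos rfl] at h
      simp only [List.cons.injEq] at h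
      exact Or.inr ⟨rest, by simp [← h.1], h.2⟩
    · rw [pvSplit, if_neg hc] at h
      obtain ⟨q, qs, hq⟩ : ∃ q qs, pvSplit rest = q :: qs := by
        cases hr : pvSplit rest with
        | nil => exact absurd hr (pvSplit_ne_nil rest)
        | cons q qs => exact ⟨q, qs, rfl⟩
      rw [hq] at h
      simp only [List.headI, List.tail, List.cons.injEq] at h
      rcases ih q qs hq with ⟨h1, h2⟩ | ⟨t, h1, h2⟩
      · exact Or.inl ⟨by rw [← h.1, h1], by rw [← h.2, h2]⟩
      · exact Or.inr ⟨t, by rw [← h.1, h1]; rfl, by rw [← h.2, h2]⟩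

lemma pv_prefix_split (w p t : List Char) (hw : '$' ∉ w) (hp : '$' ∉ p) :
    w <+: (p ++ '$' :: t) ↔ w <+: p := by
  constructor
  · intro h
    induction p generalizing w with
    | nil =>
      cases w with
      | nil => exact List.nil_prefix
      | cons a w' =>
        exfalso
        rcases h with ⟨r, hr⟩
        simp only [List.nil_append, List.cons_append, List.cons.injEq] at hr
        exact hw (by simp [hr.1])
    | cons b p' ih =>
      cases w with
      | nil => exact List.nil_prefix
      | cons a w' =>
        rcases h with ⟨r, hr⟩
        simp only [List.cons_append, List.cons.injEq] at hr
        have := ih w' (fun hm => hw (List.mem_cons_of_mem _ hm))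
          (fun hm => hp (List.mem_cons_of_mem _ hm)) ⟨r, hr.2⟩
        rw [hr.1]
        exact List.cons_prefix_cons.mpr ⟨rfl, this⟩
  · intro h
    exact h.trans (List.prefix_append _ _)

lemma pvGoA_nil (args : List String) (joined : List Char) (fuel : Nat) :
    pvGoA args joined fuel [] = [] := by
  cases fuel with
  | zero => rfl
  | succ f =>
    rw [pvGoA]
    rw [if_pos (by decide : PySem.Chars.find [] ['$'] = -1)]

lemma pv_joined_if (args : List String) (joined : List Char) (hj : args = [] → joined = []) :
    (if args.isEmpty then [] else joined) = joined := by
  cases args with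
  | nil => simp [hj rfl]
  | cons a as => simp

lemma pv_main (args : List String) (joined : List Char) (hj : args = [] → joined = []) :
    ∀ (n : Nat) (cs : List Char), cs.length ≤ n →
    pvGoA args joined n cs = (pvSplit cs).headI ++ pvProcB args joined (pvSplit cs).tail := by
  intro n
  induction n with
  | zero =>
    intro cs hlen
    have hnil : cs = [] := List.eq_nil_of_length_eq_zero (Nat.le_zero.mp hlen)
    subst hnil
    simp [pvGoA_nil, pvSplit, pvProcB]
  | succ n ih =>
    intro cs hlen
    by_cases hoff : PySem.Chars.find cs ['$'] = -1
    · have hnod : '$' ∉ cs := by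
        have hni := (PySem.Chars.find_eq_neg_one_iff cs ['$']).1 hoff
        exact fun hm => hni ((List.singleton_infix_iff _ _).2 hm)
      rw [pvGoA, if_pos hoff, pvSplit_no_dollar cs hnod]
      simp [pvProcB]
    · have h0 : 0 ≤ PySem.Chars.find cs ['$'] := by
        have hngo := PySem.Chars.neg_one_le_find cs ['$']
        omega
      obtain ⟨hpre, hmin⟩ := PySem.Chars.find_spec h0
      obtain ⟨suf, hdrop⟩ : ∃ suf,
          cs.drop (PySem.Chars.find cs ['$']).toNat = '$' :: suf := by
        rcases hpre with ⟨r, hr⟩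
        exact ⟨r, hr.symm⟩
      have htake : '$' ∉ cs.take (PySem.Chars.find cs ['$']).toNat := by
        intro hm
        obtain ⟨i, hi, hgl⟩ := List.getElem_of_mem hm
        have hij : i < (PySem.Chars.find cs ['$']).toNat := by
          simpa using (List.length_take_le _ cs).trans_lt' hi
        have hicl : i < cs.length := by
          have hi' := hi; simp [List.length_take] at hi'; omega
        refine hmin i hij ⟨cs.drop (i + 1), ?_⟩
        rw [List.getElem_take] at hgl
        rw [List.singleton_append, List.drop_eq_getElem_cons hicl, hgl]
      have hsplit : pvSplit cs = cs.take (PySem.Chars.find cs ['$']).toNat :: pvSplit suf := by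
        conv_lhs => rw [← List.take_append_drop (PySem.Chars.find cs ['$']).toNat cs]
        rw [hdrop]
        exact pvSplit_append _ _ htake
      have hlsuf : suf.length ≤ n := by
        have hld := congrArg List.length hdrop
        simp only [List.length_drop, List.length_cons] at hld
        omega
      rw [pvGoA, if_neg hoff, hsplit]
      simp only [List.headI, List.tail]
      congr 1
      split
      next c1 second t2 heq =>
        have hinj := hdrop.symm.trans heq
        injection hinj with h1 h2
        obtain rfl : suf = second :: t2 := h2
        have hlt : t2.length ≤ n := by
          simp only [List.length_cons] at hlsuf; omega
        by_cases hd : second = '$'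
        · subst hd
          rw [if_pos rfl, ih t2 hlt]
          show _ = pvProcB args joined (pvSplit ('$' :: t2))
          rw [pvSplit, if_pos rfl, ← pvSplit_cons t2]
          rfl
        · have hsplit_suf : pvSplit (second :: t2)
              = (second :: (pvSplit t2).headI) :: (pvSplit t2).tail := by
            rw [pvSplit, if_neg hd]
          have hpnod : '$' ∉ second :: (pvSplit t2).headI := by
            have hh := pvSplit_headI_no_dollar (second :: t2)
            rwa [hsplit_suf] at hh
          rw [if_neg hd]
          show _ = pvProcB args joined (pvSplit (second :: t2))
          rw [hsplit_suf]
          by_cases hdig : '1' ≤ second ∧ second ≤ '9'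
          · rw [if_pos hdig, ih t2 hlt, pvProcB, if_pos hdig]
          · rw [if_neg hdig]
            have hdec := pvSplit_decomp (second :: t2) _ _ hsplit_suf
            have hA9 : ('$' : Char) ∉ "ARGUMENTS".toList := by decide
            have hiffpre : ("ARGUMENTS".toList <+: (second :: t2))
                ↔ ("ARGUMENTS".toList <+: (second :: (pvSplit t2).headI)) := by
              rcases hdec with ⟨h1, _⟩ | ⟨t', h1, _⟩
              · rw [← h1]
              · rw [h1]
                exact pv_prefix_split _ _ _ hA9 hpnod
            by_cases harg : "ARGUMENTS".toList <+: (second :: (pvSplit t2).headI)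
            · have hargsuf : "ARGUMENTS".toList <+: (second :: t2) := hiffpre.2 harg
              have hlong : 9 ≤ (second :: (pvSplit t2).headI).length := by
                simpa using harg.length_le
              have hcond : 9 < t2.length + 2 ∧
                  PySem.Chars.startswith (second :: t2) "ARGUMENTS".toList = true := by
                constructor
                · have hl := hargsuf.length_le; simp at hl; omega
                · simpa [PySem.Chars.startswith, List.isPrefixOf_iff_prefix] using hargsuf
              rw [if_pos hcond, pv_joined_if args joined hj]
              have hsplit9 : pvSplit (List.drop 9 (second :: t2))
                  = (List.drop 9 (second :: (pvSplit t2).headI)) :: (pvSplit t2).tail := by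
                rcases hdec with ⟨h1, h2⟩ | ⟨t', h1, h2⟩
                · rw [← h1, h2]
                  refine pvSplit_no_dollar _ (fun hm => ?_)
                  rw [← h1] at hpnod
                  exact hpnod (List.mem_of_mem_drop hm)
                · rw [h1, List.drop_append_of_le_length hlong,
                      pvSplit_append _ _ (fun hm => hpnod (List.mem_of_mem_drop hm)), h2]
              have hl9 : (List.drop 9 (second :: t2)).length ≤ n := by
                simp only [List.length_drop, List.length_cons]
                simp only [List.length_cons] at hlsuf
                omega
              rw [ih _ hl9, hsplit9]
              rw [pvProcB, if_neg hdig,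
                  if_pos (by simpa [PySem.Chars.startswith, List.isPrefixOf_iff_prefix] using harg)]
              simp
            · have hcond : ¬ (9 < t2.length + 2 ∧
                  PySem.Chars.startswith (second :: t2) "ARGUMENTS".toList = true) := by
                rintro ⟨-, hsw⟩
                exact harg (hiffpre.1
                  (by simpa [PySem.Chars.startswith, List.isPrefixOf_iff_prefix] using hsw))
              rw [if_neg hcond, ih (second :: t2) hlsuf, hsplit_suf]
              rw [pvProcB, if_neg hdig,
                  if_neg (by simpa [PySem.Chars.startswith, List.isPrefixOf_iff_prefix] using harg)]
              simp
      next heq =>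
        have hsufnil : suf = [] := by
          cases suf with
          | nil => rfl
          | cons d t => exact absurd hdrop (fun hh => heq '$' d t hh)
        subst hsufnil
        rw [hdrop]
        have hcond : ¬ (9 < (['$'] : List Char).length ∧
            PySem.Chars.startswith (List.drop 1 ['$']) "ARGUMENTS".toList = true) := by
          simp
        rw [if_neg hcond]
        show ('$' : Char) :: pvGoA args joined n (List.drop 1 ['$']) = _
        rw [show (List.drop 1 ['$'] : List Char) = [] from rfl, pvGoA_nil]
        rfl

-- ===== VERDICT (by name: the statement is the Claim_ definition above) =====
theorem expand_numeric_placeholders_spec : Claim_equal_expand_numeric_placeholders := by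
  intro content args _
  unfold Spec_expand_numeric_placeholders
  unfold expand_numeric_placeholders expand_numeric_placeholders_alt
  rw [pv_splitOn_eq, ← pvSplit_cons content.toList]
  have hj : args = [] → (PySem.Str.join " " args).toList = [] := by
    intro h; subst h; rfl
  rw [pv_main args _ hj content.toList.length content.toList (le_refl _)]
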